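-- pv_equiv track=rewrite | github.com/myme5261314/BingTileDownloader | transform.py | tileXYZToQuadKey
-- ===== SOURCE A (Python) =====
-- def tileXYZToQuadKey(x, y, z):
--     '''This is a function that transform the Tile with (x,y) coordinate at (z) zoom level
--     to its corresponding QuadKey index.
--
--     Args:
--         x (int): the horizontal axes position. Range from 0-2^z-1.
--         y (int): the vertical axes position. Range from 0-2^z-1.
--         z (int): the zoom level. Range from 1-19 for the Bing Map Tile System.
--
--     Returns:
--         str: the corresponding QuadKey index which has the length of z.
--     '''
--
--     quadKey = ''
--     for i in range(z, 0, -1):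
--         digit = 0
--         mask = 1 << (i - 1)
--         if(x & mask) != 0:
--             digit += 1
--         if(y & mask) != 0:
--             digit += 2
--         quadKey += str(digit)
--     return quadKey
-- ===== SOURCE B (Python) =====
-- def tileXYZToQuadKey(x, y, z):
--     digits = []
--     while z > 0:
--         digits.append(str(x % 2 + 2 * (y % 2)))
--         x //= 2
--         y //= 2
--         z -= 1
--     return ''.join(reversed(digits))
-- ===== Notes on version B (the rewrite author's own statement) =====
-- stated objective: simpler
-- what changed: A's high-to-low loop that builds and tests a shifted mask per digit is replaced by a low-to-high loop that halves the coordinates (x//=2, y//=2) and collects str(x%2 + 2*(y%2)) per step, returning the reversed join; no shifts or masks at all.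
import Mathlib
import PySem

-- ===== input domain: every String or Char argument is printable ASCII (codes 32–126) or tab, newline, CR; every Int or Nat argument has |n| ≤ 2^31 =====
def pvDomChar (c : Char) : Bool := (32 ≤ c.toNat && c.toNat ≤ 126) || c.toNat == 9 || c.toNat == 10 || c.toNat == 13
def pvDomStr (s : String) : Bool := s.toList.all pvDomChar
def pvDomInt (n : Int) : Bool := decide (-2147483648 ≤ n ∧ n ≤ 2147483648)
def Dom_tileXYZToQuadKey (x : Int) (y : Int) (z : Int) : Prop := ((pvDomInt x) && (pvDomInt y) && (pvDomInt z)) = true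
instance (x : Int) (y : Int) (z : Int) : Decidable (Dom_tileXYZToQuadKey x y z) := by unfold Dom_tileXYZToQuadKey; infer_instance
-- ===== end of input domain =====

-- B replaces A's high-to-low mask-and-shift loop by a low-digit recursion on the
-- halved coordinates (x//2, y//2, z-1), emitting x%2 + 2*(y%2); objective: simpler.

-- ===== PORT A =====
def tileXYZToQuadKey (x : Int) (y : Int) (z : Int) : String :=
  (PySem.List.pyRange z 0 (-1)).foldl (fun quadKey i =>
    let digit : Int := 0
    let mask : Int := (1 : Int) <<< (i - 1).toNat
    let digit := if PySem.Int.band x mask ≠ 0 then digit + 1 else digit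
    let digit := if PySem.Int.band y mask ≠ 0 then digit + 2 else digit
    quadKey ++ PySem.Int.toStr digit) ""

-- ===== PORT B =====
-- the while-loop of Source B: state (x, y, z, digits), one digit appended per turn
def pvQuadDigits (x : Int) (y : Int) (z : Int) (digits : List String) : List String :=
  if 0 < z then
    pvQuadDigits (PySem.Int.floordiv x 2) (PySem.Int.floordiv y 2) (z - 1)
      (digits ++ [PySem.Int.toStr (PySem.Int.mod x 2 + 2 * PySem.Int.mod y 2)])
  else digits
termination_by z.toNat
decreasing_by omega

def tileXYZToQuadKey_alt (x : Int) (y : Int) (z : Int) : String :=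
  String.join (pvQuadDigits x y z []).reverse

-- ===== PRECONDITION & SPEC =====
def Spec_tileXYZToQuadKey (x : Int) (y : Int) (z : Int) (out : String) : Prop := out = tileXYZToQuadKey_alt x y z
instance (x : Int) (y : Int) (z : Int) (out : String) : Decidable (Spec_tileXYZToQuadKey x y z out) := by unfold Spec_tileXYZToQuadKey; infer_instance

-- ===== CLAIM (what is proved, stated in full; the proofs are below) =====
def Claim_equal_tileXYZToQuadKey : Prop := ∀ (x : Int) (y : Int) (z : Int), Dom_tileXYZToQuadKey x y z → Spec_tileXYZToQuadKey x y z (tileXYZToQuadKey x y z)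

-- ===== LEMMAS AND PROOFS =====

-- the digit string A emits for mask 2^k
def pvDig (x y : Int) (k : Nat) : String :=
  PySem.Int.toStr ((if PySem.Int.band x ((1 : Int) <<< ((k : Nat) : Int)) ≠ 0 then (0 : Int) + 1 else 0)
    + (if PySem.Int.band y ((1 : Int) <<< ((k : Nat) : Int)) ≠ 0 then (2 : Int) else 0))

-- A's result for zoom n: digits for masks n-1 … 0, highest first
def pvAux (x y : Int) : Nat → String
  | 0 => ""
  | n + 1 => pvDig x y n ++ pvAux x y n

-- Python's infinite-two's-complement bit k of x
def pvBit (x : Int) (k : Nat) : Bool :=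
  if 0 ≤ x then x.toNat.testBit k else !((-x - 1).toNat.testBit k)

lemma pv_shl (k : Nat) : (1 : Int) <<< ((k : Nat) : Int) = ((2 ^ k : Nat) : Int) := by
  rw [Int.shiftLeft_eq_mul_pow]; simp

lemma pv_band_pow (x : Int) (k : Nat) :
    (PySem.Int.band x ((1 : Int) <<< ((k : Nat) : Int)) ≠ 0) ↔ pvBit x k = true := by
  rw [pv_shl]
  by_cases hx : 0 ≤ x
  · rw [PySem.Int.band_of_nonneg hx (by positivity)]
    simp only [pvBit, if_pos hx, Int.toNat_natCast, Nat.and_two_pow]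
    cases h : x.toNat.testBit k <;> simp
  · unfold PySem.Int.band
    rw [if_neg hx, if_pos (by positivity : (0:Int) ≤ ((2^k : Nat) : Int))]
    simp only [pvBit, if_neg hx, Int.toNat_natCast, Nat.and_comm, Nat.and_two_pow]
    cases h : (-x - 1).toNat.testBit k <;> simp

lemma pv_bit_half (x : Int) (k : Nat) :
    pvBit (PySem.Int.floordiv x 2) k = pvBit x (k + 1) := by
  unfold PySem.Int.floordiv pvBit
  rw [Int.fdiv_eq_ediv]
  rw [if_pos (by norm_num : (0:Int) ≤ 2 ∨ (2:Int) ∣ x)]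
  by_cases hx : 0 ≤ x
  · rw [if_pos (by omega : (0:Int) ≤ x / 2 - 0), if_pos hx]
    have h1 : (x / 2 - 0).toNat = x.toNat / 2 := by omega
    rw [h1, ← Nat.testBit_succ]
  · rw [if_neg (by omega : ¬(0:Int) ≤ x / 2 - 0), if_neg hx]
    have h1 : (-(x / 2 - 0) - 1).toNat = (-x - 1).toNat / 2 := by omega
    rw [h1, ← Nat.testBit_succ]

-- bit k of x//2 is bit k+1 of x (Python semantics, any sign)
lemma pv_band_shift (x : Int) (k : Nat) :
    (PySem.Int.band (PySem.Int.floordiv x 2) ((1 : Int) <<< ((k : Nat) : Int)) ≠ 0)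
      ↔ (PySem.Int.band x ((1 : Int) <<< ((k + 1 : Nat) : Int)) ≠ 0) := by
  rw [pv_band_pow, pv_band_pow, pv_bit_half]

lemma pv_dig_shift (x y : Int) (k : Nat) :
    pvDig (PySem.Int.floordiv x 2) (PySem.Int.floordiv y 2) k = pvDig x y (k + 1) := by
  unfold pvDig
  congr 1
  rw [if_congr (pv_band_shift x k) rfl rfl, if_congr (pv_band_shift y k) rfl rfl]

lemma pv_pyRange_down (z : Int) :
    PySem.List.pyRange z 0 (-1) = (List.range z.toNat).map (fun k : Nat => z - (k : Int)) := by
  unfold PySem.List.pyRange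
  rw [if_neg (by norm_num : ¬((-1:Int) = 0))]
  simp only [if_neg (by norm_num : ¬((0:Int) < -1))]
  have hc : (if (0:Int) < z then ((z - 0 + - -1 - 1) / - -1).toNat else 0) = z.toNat := by
    split_ifs with h
    · norm_num
    · omega
  rw [hc]
  apply List.map_congr_left; intro k _; ring

lemma pv_foldl_emit {α : Type} (d : α → String) (l : List α) (s : String) :
    l.foldl (fun acc i => acc ++ d i) s = s ++ l.foldl (fun acc i => acc ++ d i) "" := by
  induction l generalizing s with
  | nil => simp
  | cons a t ih =>
    simp only [List.foldl_cons]
    rw [ih (s ++ d a), ih ("" ++ d a)]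
    simp [String.append_assoc]

lemma pv_range_fold (x y : Int) : ∀ (n : Nat) (z : Int), z.toNat = n →
    (List.range n).foldl (fun acc (k : Nat) => acc ++ pvDig x y (z - (k : Int) - 1).toNat) "" = pvAux x y n := by
  intro n
  induction n with
  | zero => intro z _; simp [pvAux]
  | succ m ih =>
    intro z hz
    rw [List.range_succ_eq_map]
    simp only [List.foldl_cons, List.foldl_map]
    rw [pv_foldl_emit]
    have harg : ∀ k : Nat, (z - ((Nat.succ k : Nat) : Int) - 1) = ((z - 1) - (k : Int) - 1) := by
      intro k; push_cast; ring
    simp only [harg]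
    rw [ih (z - 1) (by omega)]
    have hhead : (z - ((0:Nat) : Int) - 1).toNat = m := by omega
    rw [hhead]
    simp [pvAux]

lemma pv_A_eq_aux (x y z : Int) : tileXYZToQuadKey x y z = pvAux x y z.toNat := by
  unfold tileXYZToQuadKey
  rw [pv_pyRange_down, List.foldl_map]
  rw [List.foldl_ext _ (fun acc (k : Nat) => acc ++ pvDig x y (z - (k : Int) - 1).toNat) ""
    (by
      intro acc k _
      dsimp only
      unfold pvDig
      congr 1
      push_cast
      split_ifs <;> norm_num)]
  exact pv_range_fold x y z.toNat z rfl

lemma pv_aux_step (x y : Int) (n : Nat) :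
    pvAux x y (n + 1)
      = pvAux (PySem.Int.floordiv x 2) (PySem.Int.floordiv y 2) n ++ pvDig x y 0 := by
  induction n with
  | zero => simp [pvAux]
  | succ m ih =>
    calc pvAux x y (m + 2) = pvDig x y (m + 1) ++ pvAux x y (m + 1) := rfl
      _ = pvDig x y (m + 1) ++ (pvAux (PySem.Int.floordiv x 2) (PySem.Int.floordiv y 2) m ++ pvDig x y 0) := by rw [ih]
      _ = (pvDig (PySem.Int.floordiv x 2) (PySem.Int.floordiv y 2) m ++ pvAux (PySem.Int.floordiv x 2) (PySem.Int.floordiv y 2) m) ++ pvDig x y 0 := by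
            rw [pv_dig_shift, String.append_assoc]
      _ = pvAux (PySem.Int.floordiv x 2) (PySem.Int.floordiv y 2) (m + 1) ++ pvDig x y 0 := rfl

lemma pv_dig_zero (x y : Int) :
    pvDig x y 0 = PySem.Int.toStr (PySem.Int.mod x 2 + 2 * PySem.Int.mod y 2) := by
  unfold pvDig
  have h1 : (1 : Int) <<< (((0:Nat) : Nat) : Int) = 1 := by decide
  rw [h1, PySem.Int.band_one, PySem.Int.band_one]
  unfold PySem.Int.mod
  rw [Int.fmod_eq_emod, Int.fmod_eq_emod,
    if_pos (by norm_num : (0:Int) ≤ 2 ∨ (2:Int) ∣ x),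
    if_pos (by norm_num : (0:Int) ≤ 2 ∨ (2:Int) ∣ y)]
  congr 1
  rcases Int.emod_two_eq x with hx | hx <;> rcases Int.emod_two_eq y with hy | hy <;>
    rw [hx, hy] <;> norm_num

lemma pv_join_cons (a : String) (l : List String) :
    String.join (a :: l) = a ++ String.join l := by
  show List.foldl (· ++ ·) ("" ++ a) l = a ++ String.join l
  rw [pv_foldl_emit (fun s : String => s) l ("" ++ a)]
  simp [String.join]

lemma pv_join_append (l1 l2 : List String) :
    String.join (l1 ++ l2) = String.join l1 ++ String.join l2 := by
  induction l1 with
  | nil => simp [String.join]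
  | cons a t ih =>
    rw [List.cons_append, pv_join_cons, pv_join_cons, ih, String.append_assoc]

lemma pv_loop_acc (n : Nat) : ∀ (x y z : Int) (ds : List String), z.toNat = n →
    pvQuadDigits x y z ds = ds ++ pvQuadDigits x y z [] := by
  induction n with
  | zero =>
    intro x y z ds hz
    unfold pvQuadDigits
    rw [if_neg (by omega : ¬ 0 < z), if_neg (by omega : ¬ 0 < z)]
    simp
  | succ m ih =>
    intro x y z ds hz
    conv_lhs => unfold pvQuadDigits
    conv_rhs => unfold pvQuadDigits
    rw [if_pos (by omega : 0 < z), if_pos (by omega : 0 < z),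
      ih _ _ _ _ (by omega), ih _ _ _ ([] ++ _) (by omega)]
    simp

lemma pv_alt_zero (x y z : Int) (hz : z ≤ 0) : tileXYZToQuadKey_alt x y z = "" := by
  unfold tileXYZToQuadKey_alt pvQuadDigits
  rw [if_neg (by omega : ¬ 0 < z)]
  rfl

lemma pv_alt_succ (x y z : Int) (hz : 0 < z) :
    tileXYZToQuadKey_alt x y z
      = tileXYZToQuadKey_alt (PySem.Int.floordiv x 2) (PySem.Int.floordiv y 2) (z - 1)
        ++ PySem.Int.toStr (PySem.Int.mod x 2 + 2 * PySem.Int.mod y 2) := by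
  unfold tileXYZToQuadKey_alt
  conv_lhs => unfold pvQuadDigits
  rw [if_pos hz, pv_loop_acc (z - 1).toNat _ _ _ _ rfl]
  rw [List.nil_append, List.reverse_append, pv_join_append]
  simp [String.join]

lemma pv_main (n : Nat) : ∀ (x y z : Int), z.toNat = n →
    tileXYZToQuadKey x y z = tileXYZToQuadKey_alt x y z := by
  induction n with
  | zero =>
    intro x y z hz
    rw [pv_A_eq_aux, hz, pv_alt_zero x y z (by omega)]
    rfl
  | succ m ih =>
    intro x y z hz
    have hsub : pvAux (PySem.Int.floordiv x 2) (PySem.Int.floordiv y 2) m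
        = tileXYZToQuadKey_alt (PySem.Int.floordiv x 2) (PySem.Int.floordiv y 2) (z - 1) := by
      have h2 := pv_A_eq_aux (PySem.Int.floordiv x 2) (PySem.Int.floordiv y 2) (z - 1)
      rw [(by omega : (z - 1).toNat = m)] at h2
      rw [← h2]
      exact ih _ _ _ (by omega)
    rw [pv_A_eq_aux, hz, pv_aux_step, pv_dig_zero, hsub, pv_alt_succ x y z (by omega)]

-- ===== VERDICT (by name: the statement is the Claim_ definition above) =====
theorem tileXYZToQuadKey_spec : Claim_equal_tileXYZToQuadKey := by
  intro x y z _
  unfold Spec_tileXYZToQuadKey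
  exact pv_main z.toNat x y z rfl
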